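-- pv_equiv track=rewrite | github.com/snacksbro/squared | Project/Api/flaskapp/controller/validation/gamevalidation.py | is_adjacent
-- ===== SOURCE A (Python) =====
-- def is_adjacent(coord1, coord2):
--     # Making a list of every adjacent square
--     possibilities = [
--         [coord1[0] + 1, coord1[1]],  # right
--         [coord1[0], coord1[1] + 1],  # down
--         [coord1[0] - 1, coord1[1]],  # left
--         [coord1[0], coord1[1] - 1],  # up
--     ]
--
--     # Checking if any of them "hit" coord2
--     for possibility in possibilities:
--         # If so, return True
--         if possibility[0] == coord2[0] and possibility[1] == coord2[1]:
--             return True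
--     # If not, return False
--     return False
-- ===== SOURCE B (Python) =====
-- def is_adjacent(coord1, coord2):
--     # Closed-form: adjacent iff the cells differ by 1 on one axis and 0 on the other.
--     return (abs(coord1[0] - coord2[0]) == 1 and coord1[1] == coord2[1]) or \
--            (coord1[0] == coord2[0] and abs(coord1[1] - coord2[1]) == 1)
-- ===== Notes on version B (the rewrite author's own statement) =====
-- stated objective: simpler
-- what changed: Replaces building the list of four neighbor cells and scanning it with a single closed-form boolean over the coordinate differences (|dx|==1 and dy==0, or dx==0 and |dy|==1).
-- outside the precondition, e.g. on is_adjacent([0, 0], [5]): A returns False, B returns False; on is_adjacent([0, 0], [1]): A raises IndexError, B raises IndexError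
import Mathlib
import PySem

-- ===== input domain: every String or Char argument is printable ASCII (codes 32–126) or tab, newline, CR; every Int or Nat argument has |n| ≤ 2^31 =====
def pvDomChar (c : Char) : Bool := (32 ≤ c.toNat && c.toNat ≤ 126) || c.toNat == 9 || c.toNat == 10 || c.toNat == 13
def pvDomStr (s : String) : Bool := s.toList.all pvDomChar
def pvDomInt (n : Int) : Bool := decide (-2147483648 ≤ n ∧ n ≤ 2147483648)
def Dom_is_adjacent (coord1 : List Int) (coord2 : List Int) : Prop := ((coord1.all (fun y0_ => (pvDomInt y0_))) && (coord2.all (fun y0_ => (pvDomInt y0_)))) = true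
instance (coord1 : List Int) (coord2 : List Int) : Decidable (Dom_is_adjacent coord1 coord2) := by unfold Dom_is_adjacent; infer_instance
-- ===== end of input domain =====

-- B replaces A's four-neighbor list and scan loop with one closed-form boolean over
-- the coordinate differences (simpler; return value only, no side effects involved).

-- ===== PORT A =====
-- the `for possibility in possibilities` scan, returning True on the first hit
def pvAdjScan (possibilities : List (List Int)) (x2 y2 : Int) : Bool :=
  match possibilities with
  | [] => false
  | p :: rest =>
      if PySem.List.pyGetD p 0 0 == x2 && PySem.List.pyGetD p 1 0 == y2 then true
      else pvAdjScan rest x2 y2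

def is_adjacent (coord1 : List Int) (coord2 : List Int) : Bool :=
  match PySem.List.pyGet? coord1 0, PySem.List.pyGet? coord1 1,
        PySem.List.pyGet? coord2 0, PySem.List.pyGet? coord2 1 with
  | some x1, some y1, some x2, some y2 =>
      let possibilities : List (List Int) :=
        [[x1 + 1, y1], [x1, y1 + 1], [x1 - 1, y1], [x1, y1 - 1]]
      pvAdjScan possibilities x2 y2
  | _, _, _, _ => false  -- Python raises IndexError here; excluded by Pre_

-- ===== PORT B =====
def is_adjacent_alt (coord1 : List Int) (coord2 : List Int) : Bool :=
  match PySem.List.pyGet? coord1 0 with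
  | none => false  -- Python raises IndexError here; excluded by Pre_
  | some x1 =>
    match PySem.List.pyGet? coord1 1 with
    | none => false
    | some y1 =>
      match PySem.List.pyGet? coord2 0 with
      | none => false
      | some x2 =>
        match PySem.List.pyGet? coord2 1 with
        | none => false
        | some y2 =>
          ((x1 - x2).natAbs == 1 && y1 == y2) || (x1 == x2 && (y1 - y2).natAbs == 1)

-- ===== PRECONDITION & SPEC =====
-- Pre_ excludes inputs where either coordinate list has fewer than 2 elements: both
-- programs index [0] and [1] and can raise IndexError there (A returns False on some
-- of them only by short-circuit accident of its comparison order).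
def Pre_is_adjacent (coord1 : List Int) (coord2 : List Int) : Prop :=
  2 ≤ coord1.length ∧ 2 ≤ coord2.length
instance (coord1 : List Int) (coord2 : List Int) : Decidable (Pre_is_adjacent coord1 coord2) := by
  unfold Pre_is_adjacent; infer_instance

def pvWitness_is_adjacent : List Int × List Int := ([0, 0], [0, 1])

def Spec_is_adjacent (coord1 : List Int) (coord2 : List Int) (out : Bool) : Prop := out = is_adjacent_alt coord1 coord2
instance (coord1 : List Int) (coord2 : List Int) (out : Bool) : Decidable (Spec_is_adjacent coord1 coord2 out) := by unfold Spec_is_adjacent; infer_instance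

-- ===== CLAIM (what is proved, stated in full; the proofs are below) =====
def Claim_equal_is_adjacent : Prop := ∀ (coord1 : List Int) (coord2 : List Int), Dom_is_adjacent coord1 coord2 → Pre_is_adjacent coord1 coord2 → Spec_is_adjacent coord1 coord2 (is_adjacent coord1 coord2)

-- ===== LEMMAS AND PROOFS =====
theorem adj_core (x1 y1 x2 y2 : Int) :
    pvAdjScan [[x1 + 1, y1], [x1, y1 + 1], [x1 - 1, y1], [x1, y1 - 1]] x2 y2
      = (((x1 - x2).natAbs == 1 && y1 == y2) || (x1 == x2 && (y1 - y2).natAbs == 1)) := by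
  simp only [pvAdjScan, PySem.List.pyGetD]
  rw [Bool.eq_iff_iff]
  simp only [Bool.or_eq_true, Bool.and_eq_true, beq_iff_eq]
  constructor
  · intro h
    split_ifs at h <;> simp_all <;> omega
  · intro h
    split_ifs <;> simp_all <;> omega

-- ===== VERDICT (by name: the statement is the Claim_ definition above) =====
theorem is_adjacent_spec : Claim_equal_is_adjacent := by
  intro coord1 coord2 _ hpre
  obtain ⟨h1, h2⟩ := hpre
  match coord1, coord2 with
  | x1 :: y1 :: t1, x2 :: y2 :: t2 =>
    show is_adjacent _ _ = is_adjacent_alt _ _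
    simp only [is_adjacent, is_adjacent_alt, PySem.List.pyGet?, PySem.List.pyIdx?]
    norm_num
    exact adj_core x1 y1 x2 y2
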